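-- pv_equiv track=rewrite | github.com/argriffing/xgcode | iterutils.py | chopped_nonbreaking
-- ===== SOURCE A (Python) =====
-- def chopped_nonbreaking(sequence, size):
--     """
--     Like L{chopped} but forces consecutive identical elements to be in the same chunk.
--     Chunks containing consecutive identical elements may be larger than the desired chunk size.
--     The last chunk may be smaller than the desired chunk size.
--     @param sequence: something iterable
--     @param size: the desired size of a chunk
--     """
--     assert size > 0
--     if len(sequence) == 1:
--         yield sequence[0]
--         return
--     chunk = []
--     for item in sequence:
--         # if the chunk has at least the desired size
--         # and the item is different from the last chunk item,
--         # then start a new chunk.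
--         if len(chunk) >= size and chunk[-1] != item:
--             if type(sequence) is str:
--                 yield ''.join(chunk)
--             else:
--                 yield tuple(chunk)
--             chunk = []
--         chunk.append(item)
--     if chunk:
--         if type(sequence) is str:
--             yield ''.join(chunk)
--         else:
--             yield tuple(chunk)
-- ===== SOURCE B (Python) =====
-- def chopped_nonbreaking(sequence, size):
--     """Same chunks as A, built run-by-run: scan maximal runs of equal
--     elements with two indices and flush the chunk only at run boundaries."""
--     assert size > 0
--     if len(sequence) == 1:
--         yield sequence[0]
--         return
--     is_str = type(sequence) is str
--     chunk = []
--     i, n = 0, len(sequence)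
--     while i < n:
--         j = i
--         while j < n and sequence[j] == sequence[i]:
--             j += 1
--         if len(chunk) >= size:
--             yield ''.join(chunk) if is_str else tuple(chunk)
--             chunk = []
--         chunk.extend(sequence[i:j])
--         i = j
--     if chunk:
--         yield ''.join(chunk) if is_str else tuple(chunk)
-- ===== Notes on version B (the rewrite author's own statement) =====
-- stated objective: alternative
-- what changed: B replaces A's per-item flush loop (which re-checks the break condition chunk[-1] != item for every element) by a two-index scan that extracts each maximal run of equal elements in one inner sweep and flushes the chunk only at run boundaries.
import Mathlib
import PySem

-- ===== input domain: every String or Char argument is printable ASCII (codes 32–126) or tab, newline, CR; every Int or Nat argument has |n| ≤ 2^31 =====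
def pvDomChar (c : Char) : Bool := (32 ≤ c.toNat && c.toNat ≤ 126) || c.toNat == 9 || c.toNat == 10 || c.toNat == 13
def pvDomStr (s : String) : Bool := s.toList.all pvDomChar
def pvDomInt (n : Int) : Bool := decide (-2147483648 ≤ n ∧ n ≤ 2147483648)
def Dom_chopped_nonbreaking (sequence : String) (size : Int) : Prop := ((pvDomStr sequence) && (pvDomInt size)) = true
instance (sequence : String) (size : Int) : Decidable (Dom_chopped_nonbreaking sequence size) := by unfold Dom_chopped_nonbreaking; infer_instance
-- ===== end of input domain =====

-- B builds maximal runs of equal characters with an inner scan and flushes only at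
-- run boundaries, instead of A's per-item flush test; same chunks, same order.
-- A raises AssertionError when size <= 0, hence Pre_.

-- ===== PORT A =====
-- A's loop: for each item, flush when len(chunk) >= size and chunk[-1] != item.
def chopLoopA (size : Int) : List Char → List Char → List String
  | [], chunk => if chunk.isEmpty then [] else [String.mk chunk]
  | item :: rest, chunk =>
    if (chunk.length : Int) ≥ size ∧ chunk.getLast? ≠ some item then
      String.mk chunk :: chopLoopA size rest [item]
    else
      chopLoopA size rest (chunk ++ [item])

def chopped_nonbreaking (sequence : String) (size : Int) : List String :=
  let cs := sequence.toList
  if cs.length = 1 then [String.mk (cs.take 1)]   -- yield sequence[0]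
  else chopLoopA size cs []

-- ===== PORT B =====
-- inner while loop of B: split off the maximal run (characters equal to c) from the front.
def takeRunB (c : Char) : List Char → List Char × List Char
  | [] => ([], [])
  | x :: xs =>
    if x = c then
      let p := takeRunB c xs
      (x :: p.1, p.2)
    else ([], x :: xs)

theorem takeRunB_snd_le (c : Char) : ∀ xs : List Char, (takeRunB c xs).2.length ≤ xs.length := by
  intro xs
  induction xs with
  | nil => simp [takeRunB]
  | cons x xs ih =>
    simp only [takeRunB]
    split
    · exact Nat.le_succ_of_le ih
    · simp

-- outer while loop of B: consume runs, flushing the chunk before extending it.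
def chopLoopB (size : Int) : List Char → List Char → List String
  | [], chunk => if chunk.isEmpty then [] else [String.mk chunk]
  | x :: xs, chunk =>
    let p := takeRunB x xs
    if (chunk.length : Int) ≥ size then
      String.mk chunk :: chopLoopB size p.2 (x :: p.1)
    else
      chopLoopB size p.2 (chunk ++ x :: p.1)
termination_by xs _ => xs.length
decreasing_by
  · exact Nat.lt_succ_of_le (takeRunB_snd_le x xs)
  · exact Nat.lt_succ_of_le (takeRunB_snd_le x xs)

def chopped_nonbreaking_alt (sequence : String) (size : Int) : List String :=
  let cs := sequence.toList
  if cs.length = 1 then [String.mk (cs.take 1)]   -- yield sequence[0]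
  else chopLoopB size cs []

-- ===== PRECONDITION & SPEC =====
def Pre_chopped_nonbreaking (sequence : String) (size : Int) : Prop := 0 < size
instance (sequence : String) (size : Int) : Decidable (Pre_chopped_nonbreaking sequence size) := by unfold Pre_chopped_nonbreaking; infer_instance
def pvWitness_chopped_nonbreaking : String × Int := ("aabcc", 2)
def Spec_chopped_nonbreaking (sequence : String) (size : Int) (out : List String) : Prop := out = chopped_nonbreaking_alt sequence size
instance (sequence : String) (size : Int) (out : List String) : Decidable (Spec_chopped_nonbreaking sequence size out) := by unfold Spec_chopped_nonbreaking; infer_instance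

-- ===== CLAIM (what is proved, stated in full; the proofs are below) =====
def Claim_equal_chopped_nonbreaking : Prop := ∀ (sequence : String) (size : Int), Dom_chopped_nonbreaking sequence size → Pre_chopped_nonbreaking sequence size → Spec_chopped_nonbreaking sequence size (chopped_nonbreaking sequence size)

-- ===== LEMMAS AND PROOFS =====

theorem takeRunB_decomp (c : Char) : ∀ xs : List Char, (takeRunB c xs).1 ++ (takeRunB c xs).2 = xs := by
  intro xs
  induction xs with
  | nil => simp [takeRunB]
  | cons x xs ih =>
    simp only [takeRunB]
    split
    · next h => simp [ih, h]
    · simp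

theorem takeRunB_mem (c : Char) : ∀ xs : List Char, ∀ a ∈ (takeRunB c xs).1, a = c := by
  intro xs
  induction xs with
  | nil => simp [takeRunB]
  | cons x xs ih =>
    simp only [takeRunB]
    split
    · next h =>
      intro a ha
      rcases List.mem_cons.mp ha with h1 | h1
      · exact h1.trans h
      · exact ih a h1
    · simp

theorem takeRunB_head (c : Char) : ∀ xs : List Char, ∀ y, (takeRunB c xs).2.head? = some y → y ≠ c := by
  intro xs
  induction xs with
  | nil => simp [takeRunB]
  | cons x xs ih =>
    simp only [takeRunB]
    split
    · exact ih
    · next h =>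
      intro y hy
      simp only [List.head?_cons, Option.some.injEq] at hy
      exact hy ▸ h

theorem getLast?_cons_run (x : Char) (run : List Char) (h : ∀ a ∈ run, a = x) :
    (x :: run).getLast? = some x := by
  induction run with
  | nil => simp
  | cons a run ih =>
    have hax : a = x := h a (by simp)
    have : (x :: a :: run).getLast? = (a :: run).getLast? := by simp [List.getLast?_cons_cons]
    rw [this, hax]
    exact ih (fun b hb => h b (by simp [hb]))

theorem getLast?_append_run (chunk run : List Char) (x : Char) (h : ∀ a ∈ run, a = x) :
    (chunk ++ x :: run).getLast? = some x := by
  rw [List.getLast?_append_cons]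
  exact getLast?_cons_run x run h

theorem chopLoopA_run (size : Int) (run : List Char) (c : Char) (hr : ∀ a ∈ run, a = c) :
    ∀ (rest chunk : List Char), chunk.getLast? = some c →
      chopLoopA size (run ++ rest) chunk = chopLoopA size rest (chunk ++ run) := by
  induction run with
  | nil => intro rest chunk _; simp
  | cons a run ih =>
    intro rest chunk hc
    have hac : a = c := hr a (by simp)
    have hcond : ¬((chunk.length : Int) ≥ size ∧ chunk.getLast? ≠ some a) := by
      rintro ⟨-, h2⟩
      exact h2 (hac ▸ hc)
    simp only [List.cons_append, chopLoopA, if_neg hcond]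
    have hc' : (chunk ++ [a]).getLast? = some c := by
      rw [List.getLast?_concat]; exact congrArg some hac
    rw [ih (fun b hb => hr b (by simp [hb])) rest (chunk ++ [a]) hc']
    congr 1
    simp

theorem chopLoopAB (size : Int) : ∀ (n : ℕ) (xs chunk : List Char), xs.length ≤ n →
    (∀ y, xs.head? = some y → chunk.getLast? ≠ some y) →
    chopLoopA size xs chunk = chopLoopB size xs chunk := by
  intro n
  induction n with
  | zero =>
    intro xs chunk hn _
    have : xs = [] := List.eq_nil_of_length_eq_zero (Nat.le_zero.mp hn)
    subst this
    simp [chopLoopA, chopLoopB]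
  | succ m ih =>
    intro xs chunk hn hhead
    cases xs with
    | nil => simp [chopLoopA, chopLoopB]
    | cons x xs =>
      have hlast : chunk.getLast? ≠ some x := hhead x (by simp)
      have hxs : xs.length ≤ m := Nat.succ_le_succ_iff.mp hn
      have hrest : (takeRunB x xs).2.length ≤ m := le_trans (takeRunB_snd_le x xs) hxs
      have hrun : ∀ a ∈ (takeRunB x xs).1, a = x := takeRunB_mem x xs
      have hdec : (takeRunB x xs).1 ++ (takeRunB x xs).2 = xs := takeRunB_decomp x xs
      by_cases hsz : (chunk.length : Int) ≥ size
      · have hcond : (chunk.length : Int) ≥ size ∧ chunk.getLast? ≠ some x := ⟨hsz, hlast⟩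
        simp only [chopLoopA, chopLoopB, if_pos hcond, if_pos hsz]
        congr 1
        conv_lhs => rw [← hdec]
        rw [chopLoopA_run size (takeRunB x xs).1 x hrun (takeRunB x xs).2 [x] (by simp)]
        refine ih (takeRunB x xs).2 (x :: (takeRunB x xs).1) hrest ?_
        intro y hy h
        rw [getLast?_cons_run x _ hrun] at h
        exact takeRunB_head x xs y hy (Option.some_inj.mp h).symm
      · have hcond : ¬((chunk.length : Int) ≥ size ∧ chunk.getLast? ≠ some x) := fun h => hsz h.1
        simp only [chopLoopA, chopLoopB, if_neg hcond, if_neg hsz]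
        conv_lhs => rw [← hdec]
        rw [chopLoopA_run size (takeRunB x xs).1 x hrun (takeRunB x xs).2 (chunk ++ [x])
          (by rw [List.getLast?_concat])]
        rw [show chunk ++ [x] ++ (takeRunB x xs).1 = chunk ++ x :: (takeRunB x xs).1 by simp]
        refine ih (takeRunB x xs).2 (chunk ++ x :: (takeRunB x xs).1) hrest ?_
        intro y hy h
        rw [getLast?_append_run chunk _ x hrun] at h
        exact takeRunB_head x xs y hy (Option.some_inj.mp h).symm

-- ===== VERDICT (by name: the statement is the Claim_ definition above) =====
theorem chopped_nonbreaking_spec : Claim_equal_chopped_nonbreaking := by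
  intro sequence size _ _
  unfold Spec_chopped_nonbreaking chopped_nonbreaking chopped_nonbreaking_alt
  by_cases h : sequence.toList.length = 1
  · simp [h]
  · simp only [h, if_false]
    exact chopLoopAB size sequence.toList.length sequence.toList [] le_rfl (by simp)
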